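-- pv_equiv track=rewrite | github.com/XiaoCaoAskedForHelp/LeetCode-Py | 字符串/前缀异或和/Solution1915最美子字符串的数目.py | wonderfulSubstrings1
-- ===== SOURCE A (Python) =====
-- def wonderfulSubstrings1(word: str) -> int:
--     dic = {0: 1}  # 统计异或前缀子串的数量,如果前缀和直接是0，那么可以多加1
--     pre = 0
--     res = 0
--     for i, w in enumerate(word):
--         pre ^= 1 << (ord(w) - ord('a'))
--         if pre in dic:
--             res += dic[pre]
--             dic[pre] += 1
--         else:
--             dic[pre] = 1
--         for k in range(10):
--             if pre ^ (1 << k) in dic: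
--                 res += dic[pre ^ (1 << k)]
--     return res
-- ===== SOURCE B (Python) =====
-- def wonderfulSubstrings1(word: str) -> int:
--     # Problem 1915 words use letters 'a'..'j', so a "wonderful" substring is one whose
--     # letter-parity mask is 0 or a single one of the ten low bits.
--     good = {0} | {1 << k for k in range(10)}
--     res = 0
--     n = len(word)
--     for i in range(n):
--         mask = 0
--         for j in range(i, n):
--             mask ^= 1 << (ord(word[j]) - ord('a'))
--             if mask in good:
--                 res += 1
--     return res
-- ===== Notes on version B (the rewrite author's own statement) =====
-- stated objective: alternative
-- what changed: B replaces A's single-pass prefix-xor hashmap counting with a direct double loop over substring starts and ends, testing each substring's letter-parity mask for membership in the 11 wonderful masks; it trades A's O(n) indexed pass for an O(n^2) rescan with O(1) extra space.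
import Mathlib
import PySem

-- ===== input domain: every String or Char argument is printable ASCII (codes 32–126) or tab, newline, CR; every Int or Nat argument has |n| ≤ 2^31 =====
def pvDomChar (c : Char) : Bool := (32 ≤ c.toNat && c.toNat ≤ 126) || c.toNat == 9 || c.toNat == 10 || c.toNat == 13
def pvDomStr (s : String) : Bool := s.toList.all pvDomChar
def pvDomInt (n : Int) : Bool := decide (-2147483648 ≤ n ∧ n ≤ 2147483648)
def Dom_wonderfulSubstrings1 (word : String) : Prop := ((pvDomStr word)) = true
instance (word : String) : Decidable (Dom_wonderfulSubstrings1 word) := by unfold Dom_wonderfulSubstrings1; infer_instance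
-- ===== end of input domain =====

-- B replaces A's prefix-xor hashmap pass by a direct double loop over substring starts/ends,
-- testing each substring's parity mask against the 11 wonderful masks (alternative algorithm, not faster).

-- ===== PORT A =====
-- 1 << (ord(w) - ord('a')); Python masks are nonnegative ints, ported as Nat
-- (exact under Pre_, which requires ord(w) ≥ 97 — below that Python raises ValueError).
def pvBit (c : Char) : Nat := 1 <<< (c.toNat - 97)

-- loop body of A: pre ^= bit; dict update / res += dic[pre]; the k-in-range(10) inner loop
def pvStepA (st : PySem.Dict Nat Int × Nat × Int) (c : Char) : PySem.Dict Nat Int × Nat × Int :=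
  let pre := st.2.1 ^^^ pvBit c
  let dr : PySem.Dict Nat Int × Int :=
    match st.1.get? pre with
    | some v => (st.1.insert pre (v + 1), st.2.2 + v)
    | none   => (st.1.insert pre 1, st.2.2)
  let res := (List.range 10).foldl (fun r k =>
      match dr.1.get? (pre ^^^ (1 <<< k)) with
      | some v => r + v
      | none   => r) dr.2
  (dr.1, pre, res)

def wonderfulSubstrings1 (word : String) : Int :=
  (word.toList.foldl pvStepA (PySem.Dict.ofList [(0, 1)], 0, 0)).2.2

-- ===== PORT B =====
-- good = {0} | {1 << k for k in range(10)}
def pvGoodL : List Nat := 0 :: (List.range 10).map (fun k => 1 <<< k)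
def pvGood : PySem.Set Nat := PySem.Set.ofList pvGoodL

-- inner loop body of B: mask ^= bit; if mask in good: res += 1
def pvInnerB (p : Nat × Int) (c : Char) : Nat × Int :=
  let mask := p.1 ^^^ pvBit c
  (mask, if pvGood.contains mask then p.2 + 1 else p.2)

-- the j-loop runs over the characters word[i:], ported as (toList).drop i (exact)
def wonderfulSubstrings1_alt (word : String) : Int :=
  (List.range word.toList.length).foldl
    (fun res i => ((word.toList.drop i).foldl pvInnerB (0, res)).2) 0

-- ===== PRECONDITION & SPEC =====
-- Pre_ excludes exactly the words containing a character of code < 97: there Python's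
-- 1 << (ord(w) - 97) has a negative shift and raises ValueError in A and in B alike.
def Pre_wonderfulSubstrings1 (word : String) : Prop := (word.toList.all (fun c => 97 ≤ c.toNat)) = true
instance (word : String) : Decidable (Pre_wonderfulSubstrings1 word) := by
  unfold Pre_wonderfulSubstrings1; infer_instance
def pvWitness_wonderfulSubstrings1 : String := "abcab"

def Spec_wonderfulSubstrings1 (word : String) (out : Int) : Prop := out = wonderfulSubstrings1_alt word
instance (word : String) (out : Int) : Decidable (Spec_wonderfulSubstrings1 word out) := by
  unfold Spec_wonderfulSubstrings1; infer_instance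

-- ===== CLAIM (what is proved, stated in full; the proofs are below) =====
def Claim_equal_wonderfulSubstrings1 : Prop := ∀ (word : String), Dom_wonderfulSubstrings1 word → Pre_wonderfulSubstrings1 word → Spec_wonderfulSubstrings1 word (wonderfulSubstrings1 word)

-- ===== LEMMAS AND PROOFS =====

-- Bool test "m is a wonderful parity mask" as a plain list membership
def pvGoodB (m : Nat) : Bool := pvGoodL.contains m

-- successive xor-prefix values produced while scanning cs starting from accumulator m
def pvMasks (m : Nat) : List Char → List Nat
  | [] => []
  | c :: cs => (m ^^^ pvBit c) :: pvMasks (m ^^^ pvBit c) cs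

-- number of pairs i < j in the list whose xor is wonderful, grouped by the first element
def pvPairs : List Nat → Nat
  | [] => 0
  | a :: rest => rest.countP (fun b => pvGoodB (a ^^^ b)) + pvPairs rest

theorem pvGood_contains (m : Nat) : pvGood.contains m = pvGoodB m := by
  have h : pvGood = pvGoodL := by decide
  rw [h]; simp [pvGoodB]

theorem pvXor_cancel (d a b : Nat) : (d ^^^ a) ^^^ (d ^^^ b) = a ^^^ b := by
  rw [Nat.xor_comm d a, Nat.xor_assoc, ← Nat.xor_assoc d d b, Nat.xor_self, Nat.zero_xor]

theorem pvPairs_snoc (l : List Nat) (x : Nat) :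
    pvPairs (l ++ [x]) = pvPairs l + l.countP (fun v => pvGoodB (v ^^^ x)) := by
  induction l with
  | nil => simp [pvPairs]
  | cons a l ih =>
    simp only [List.cons_append, pvPairs, List.countP_append, List.countP_cons, ih]
    simp only [List.countP_nil]
    omega

theorem pvPairs_shift (d : Nat) (l : List Nat) :
    pvPairs (l.map (fun x => d ^^^ x)) = pvPairs l := by
  induction l with
  | nil => rfl
  | cons a l ih =>
    simp only [List.map_cons, pvPairs, ih, List.countP_map]
    congr 1
    apply List.countP_congr
    intro b _
    simp [Function.comp, pvXor_cancel]

theorem pvMasks_shift (d m : Nat) (cs : List Char) :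
    pvMasks (d ^^^ m) cs = (pvMasks m cs).map (fun x => d ^^^ x) := by
  induction cs generalizing m with
  | nil => rfl
  | cons c cs ih => simp only [pvMasks, List.map_cons, Nat.xor_assoc, ih]

-- pointwise indicator split: "v xor p is wonderful" = "v = p" + Σ_k "v = p ^^^ 2^k"
theorem pvPointwise (v p : Nat) :
    (if pvGoodB (v ^^^ p) then (1 : Nat) else 0) =
      (if v = p then 1 else 0) +
        ((List.range 10).map (fun k => if v = p ^^^ (1 <<< k) then (1 : Nat) else 0)).sum := by
  have hx : ∀ t : Nat, (v = p ^^^ t) ↔ (v ^^^ p = t) := by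
    intro t
    constructor
    · intro h; subst h
      rw [Nat.xor_comm p t, Nat.xor_assoc, Nat.xor_self, Nat.xor_zero]
    · intro h; rw [← h, Nat.xor_comm v p, ← Nat.xor_assoc, Nat.xor_self, Nat.zero_xor]
  have h0 : (v = p) ↔ (v ^^^ p = 0) := by
    rw [Nat.xor_eq_zero_iff]
  simp only [hx, h0]
  generalize v ^^^ p = m
  by_cases hg : pvGoodB m = true
  · simp only [pvGoodB, pvGoodL, List.contains_cons] at hg
    rcases (by simpa using hg : m = 0 ∨ ∃ k < 10, 1 <<< k = m) with h | ⟨k, hk, h⟩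
    · subst h; decide
    · subst h; interval_cases k <;> decide
  · have hg' : ∀ t, t ∈ pvGoodL → m ≠ t := by
      intro t ht he
      subst he
      exact hg (by simpa [pvGoodB] using ht)
    have hz : m ≠ 0 := hg' 0 (by simp [pvGoodL])
    have hk : ∀ k ∈ List.range 10, m ≠ 1 <<< k := by
      intro k hkr
      apply hg'
      simp only [pvGoodL, List.mem_cons, List.mem_map]
      exact Or.inr ⟨k, hkr, rfl⟩
    rw [if_neg hg, if_neg hz]
    have : ((List.range 10).map (fun k => if m = 1 <<< k then (1 : Nat) else 0)).sum = 0 := by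
      apply List.sum_eq_zero
      intro x hx
      rcases List.mem_map.mp hx with ⟨k, hkm, rfl⟩
      simp [hk k hkm]
    omega

theorem pvCountSplit (l : List Nat) (p : Nat) :
    l.countP (fun v => pvGoodB (v ^^^ p)) =
      l.count p + ((List.range 10).map (fun k => l.count (p ^^^ (1 <<< k)))).sum := by
  induction l with
  | nil => simp
  | cons a l ih =>
    have hsum : ((List.range 10).map (fun k => (a :: l).count (p ^^^ (1 <<< k)))).sum
        = ((List.range 10).map (fun k => l.count (p ^^^ (1 <<< k)))).sum
          + ((List.range 10).map (fun k => if a = p ^^^ (1 <<< k) then (1 : Nat) else 0)).sum := by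
      rw [← List.sum_map_add]
      congr 1
      apply List.map_congr_left
      intro k _
      rw [List.count_cons]
      simp only [beq_iff_eq]
    rw [List.countP_cons, List.count_cons, hsum]
    have hp := pvPointwise a p
    by_cases hap : a = p <;> by_cases hgp : pvGoodB (a ^^^ p) = true <;>
      simp [hap, hgp, beq_iff_eq] at hp ⊢ <;> omega

-- B-side: the inner fold counts the wonderful masks of pvMasks
theorem pvInner_spec (cs : List Char) (m : Nat) (r : Int) :
    (cs.foldl pvInnerB (m, r)).2 = r + ((pvMasks m cs).countP pvGoodB : Int) := by
  induction cs generalizing m r with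
  | nil => simp [pvMasks]
  | cons c cs ih =>
    simp only [List.foldl_cons, pvInnerB, pvMasks, List.countP_cons, pvGood_contains]
    rw [ih]
    by_cases h : pvGoodB (m ^^^ pvBit c) = true
    · simp [h]; omega
    · simp [h]

theorem pvSum_eq_pairs (cs : List Char) :
    ((List.range cs.length).map (fun i => (pvMasks 0 (cs.drop i)).countP pvGoodB)).sum =
      pvPairs (0 :: pvMasks 0 cs) := by
  induction cs with
  | nil => simp [pvPairs, pvMasks]
  | cons c cs ih =>
    have hshift : pvMasks (pvBit c) cs = (pvMasks 0 cs).map (fun x => pvBit c ^^^ x) := by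
      have h := pvMasks_shift (pvBit c) 0 cs
      rwa [Nat.xor_zero] at h
    have htail : pvPairs (pvMasks 0 (c :: cs)) = pvPairs (0 :: pvMasks 0 cs) := by
      show pvPairs ((0 ^^^ pvBit c) :: pvMasks (0 ^^^ pvBit c) cs) = _
      rw [Nat.zero_xor, hshift]
      have : pvBit c :: (pvMasks 0 cs).map (fun x => pvBit c ^^^ x)
          = (0 :: pvMasks 0 cs).map (fun x => pvBit c ^^^ x) := by
        simp
      rw [this, pvPairs_shift]
    rw [List.length_cons, List.range_succ_eq_map, List.map_cons, List.map_map, List.sum_cons]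
    have hmapeq : ((List.range cs.length).map
          ((fun i => (pvMasks 0 ((c :: cs).drop i)).countP pvGoodB) ∘ Nat.succ)).sum
        = ((List.range cs.length).map (fun i => (pvMasks 0 (cs.drop i)).countP pvGoodB)).sum := by
      congr 1
    rw [hmapeq, ih, List.drop_zero, ← htail]
    simp only [pvPairs, Nat.zero_xor]

theorem pvFoldl_add_list (ks : List Nat) (f : Nat → Nat) (r : Int) :
    ks.foldl (fun r i => r + ((f i : Nat) : Int)) r = r + ((ks.map f).sum : Int) := by
  induction ks generalizing r with
  | nil => simp
  | cons k ks ih =>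
    simp only [List.foldl_cons, List.map_cons, List.sum_cons, ih]
    push_cast
    ring

theorem pvAlt_eq_pairs (word : String) :
    wonderfulSubstrings1_alt word = (pvPairs (0 :: pvMasks 0 word.toList) : Int) := by
  unfold wonderfulSubstrings1_alt
  have hfun : (fun (res : Int) (i : Nat) => ((word.toList.drop i).foldl pvInnerB (0, res)).2)
      = fun (res : Int) (i : Nat) =>
          res + (((fun i => (pvMasks 0 (word.toList.drop i)).countP pvGoodB) i : Nat) : Int) := by
    funext res i
    exact pvInner_spec (word.toList.drop i) 0 res
  rw [hfun, pvFoldl_add_list, pvSum_eq_pairs]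
  simp

-- A-side: the range(10) fold under the dict-as-counter reading
theorem pvFoldl_match (ks : List Nat) (r : Int) (get : Nat → Option Int) (f : Nat → Nat)
    (h : ∀ k ∈ ks, get k = if f k = 0 then none else some ((f k : Nat) : Int)) :
    ks.foldl (fun r k => match get k with | some v => r + v | none => r) r
      = r + ((ks.map f).sum : Int) := by
  induction ks generalizing r with
  | nil => simp
  | cons k ks ih =>
    have hk := h k (by simp)
    simp only [List.foldl_cons, List.map_cons, List.sum_cons]
    by_cases hz : f k = 0
    · rw [hk, if_pos hz, ih _ (fun k hkm => h k (by simp [hkm]))]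
      simp [hz]
    · rw [hk, if_neg hz, ih _ (fun k hkm => h k (by simp [hkm]))]
      show r + (f k : Int) + ((ks.map f).sum : Nat) = _
      push_cast
      ring

-- A-side loop invariant: dic is the counter of the prefix values seen so far, and the
-- result grows by exactly the new wonderful pairs (pvPairs of the snoc-extended history).
theorem pvLoopA (cs : List Char) (d : PySem.Dict Nat Int) (pre : Nat) (old : List Nat) (r : Int)
    (hinv : ∀ v : Nat, d.get? v =
      if (pre :: old).count v = 0 then none else some (((pre :: old).count v : Nat) : Int)) :
    (cs.foldl pvStepA (d, pre, r)).2.2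
      = r + (pvPairs ((pre :: old).reverse ++ pvMasks pre cs) : Int)
          - (pvPairs ((pre :: old).reverse) : Int) := by
  induction cs generalizing d pre old r with
  | nil => simp [pvMasks]
  | cons c cs ih =>
    have hp1 := hinv (pre ^^^ pvBit c)
    have hne : ∀ k : Nat, (pre ^^^ pvBit c) ^^^ 1 <<< k ≠ pre ^^^ pvBit c := by
      intro k he
      have h0 : (1 : Nat) <<< k = 0 := by
        have := congrArg ((pre ^^^ pvBit c) ^^^ ·) he
        simp only [← Nat.xor_assoc, Nat.xor_self, Nat.zero_xor] at this
        exact this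
      simp [Nat.shiftLeft_eq] at h0
    have hcnt : ∀ x : Nat, x ≠ pre ^^^ pvBit c →
        ((pre ^^^ pvBit c) :: pre :: old).count x = (pre :: old).count x := by
      intro x hx
      rw [List.count_cons]
      simp [Ne.symm hx]
    have hrev : ((pre ^^^ pvBit c) :: pre :: old).reverse = (pre :: old).reverse ++ [pre ^^^ pvBit c] := by
      simp
    have hsnoc := pvPairs_snoc ((pre :: old).reverse) (pre ^^^ pvBit c)
    have hcrev : ((pre :: old).reverse).countP (fun v0 => pvGoodB (v0 ^^^ (pre ^^^ pvBit c)))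
        = (pre :: old).countP (fun v0 => pvGoodB (v0 ^^^ (pre ^^^ pvBit c))) := List.countP_reverse ..
    have hsplit := pvCountSplit (pre :: old) (pre ^^^ pvBit c)
    have happ : (pre :: old).reverse ++ pvMasks pre (c :: cs)
        = ((pre :: old).reverse ++ [pre ^^^ pvBit c]) ++ pvMasks (pre ^^^ pvBit c) cs := by
      simp [pvMasks]
    simp only [List.foldl_cons]
    cases hq : d.get? (pre ^^^ pvBit c) with
    | none =>
      rw [hq] at hp1
      have hc : (pre :: old).count (pre ^^^ pvBit c) = 0 := by
        by_contra hcc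
        rw [if_neg hcc] at hp1
        simp at hp1
      have hget : ∀ k ∈ List.range 10,
          (d.insert (pre ^^^ pvBit c) 1).get? ((pre ^^^ pvBit c) ^^^ 1 <<< k)
            = if (pre :: old).count ((pre ^^^ pvBit c) ^^^ 1 <<< k) = 0 then none
              else some (((pre :: old).count ((pre ^^^ pvBit c) ^^^ 1 <<< k) : Nat) : Int) := by
        intro k _
        rw [PySem.Dict.get?_insert_of_ne _ _ (hne k)]
        exact hinv _
      have hinv' : ∀ v : Nat, (d.insert (pre ^^^ pvBit c) 1).get? v =
          if ((pre ^^^ pvBit c) :: pre :: old).count v = 0 then none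
          else some ((((pre ^^^ pvBit c) :: pre :: old).count v : Nat) : Int) := by
        intro v
        by_cases hv : v = pre ^^^ pvBit c
        · subst hv
          rw [PySem.Dict.get?_insert_self, List.count_cons]
          simp [hc]
        · rw [PySem.Dict.get?_insert_of_ne _ _ hv, hcnt v hv]
          exact hinv v
      simp only [pvStepA, hq]
      rw [pvFoldl_match (List.range 10) r
            (fun k => (d.insert (pre ^^^ pvBit c) 1).get? ((pre ^^^ pvBit c) ^^^ 1 <<< k))
            (fun k => (pre :: old).count ((pre ^^^ pvBit c) ^^^ 1 <<< k)) hget,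
          ih _ _ _ _ hinv', hrev, hsnoc, hcrev, hsplit, happ]
      have hc0 : (pre :: old).count (pre ^^^ pvBit c) = 0 := hc
      omega
    | some v =>
      rw [hq] at hp1
      have hc : (pre :: old).count (pre ^^^ pvBit c) ≠ 0 := by
        by_contra hcc
        rw [if_pos hcc] at hp1
        simp at hp1
      rw [if_neg hc] at hp1
      have hv : v = ((pre :: old).count (pre ^^^ pvBit c) : Int) := Option.some.inj hp1
      have hget : ∀ k ∈ List.range 10,
          (d.insert (pre ^^^ pvBit c) (v + 1)).get? ((pre ^^^ pvBit c) ^^^ 1 <<< k)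
            = if (pre :: old).count ((pre ^^^ pvBit c) ^^^ 1 <<< k) = 0 then none
              else some (((pre :: old).count ((pre ^^^ pvBit c) ^^^ 1 <<< k) : Nat) : Int) := by
        intro k _
        rw [PySem.Dict.get?_insert_of_ne _ _ (hne k)]
        exact hinv _
      have hinv' : ∀ v0 : Nat, (d.insert (pre ^^^ pvBit c) (v + 1)).get? v0 =
          if ((pre ^^^ pvBit c) :: pre :: old).count v0 = 0 then none
          else some ((((pre ^^^ pvBit c) :: pre :: old).count v0 : Nat) : Int) := by
        intro v0
        by_cases hv0 : v0 = pre ^^^ pvBit c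
        · subst hv0
          rw [PySem.Dict.get?_insert_self, List.count_cons]
          simp [hv]
        · rw [PySem.Dict.get?_insert_of_ne _ _ hv0, hcnt v0 hv0]
          exact hinv v0
      simp only [pvStepA, hq]
      rw [pvFoldl_match (List.range 10) (r + v)
            (fun k => (d.insert (pre ^^^ pvBit c) (v + 1)).get? ((pre ^^^ pvBit c) ^^^ 1 <<< k))
            (fun k => (pre :: old).count ((pre ^^^ pvBit c) ^^^ 1 <<< k)) hget,
          ih _ _ _ _ hinv', hrev, hsnoc, hcrev, hsplit, happ, hv]
      omega

theorem pvA_eq_pairs (word : String) :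
    wonderfulSubstrings1 word = (pvPairs (0 :: pvMasks 0 word.toList) : Int) := by
  unfold wonderfulSubstrings1
  have hinv : ∀ v : Nat, (PySem.Dict.ofList [((0 : Nat), (1 : Int))]).get? v =
      if ((0 : Nat) :: ([] : List Nat)).count v = 0 then none
      else some (((((0 : Nat) :: ([] : List Nat)).count v : Nat)) : Int) := by
    intro v
    rcases eq_or_ne v 0 with h | h
    · simp [h, PySem.Dict.ofList, PySem.Dict.update]
    · simp [h, PySem.Dict.ofList, PySem.Dict.update, PySem.Dict.get?_insert, Ne.symm h]
  rw [pvLoopA word.toList _ 0 [] 0 hinv]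
  simp [pvPairs]

-- ===== VERDICT (by name: the statement is the Claim_ definition above) =====
theorem wonderfulSubstrings1_spec : Claim_equal_wonderfulSubstrings1 := by
  intro word _ _
  unfold Spec_wonderfulSubstrings1
  rw [pvA_eq_pairs, pvAlt_eq_pairs]
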